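-- pv_equiv track=rewrite | github.com/yjohbjects/1d1a | xguu9604/week16/P132265.py | solution
-- ===== SOURCE A (Python) =====
-- from collections import Counter
--
-- def solution(topping):
--     answer = 0
--     # 전체 토핑의 종류와 개수를 딕셔너리 형태로 보관
--     piece_1 = Counter(topping)
--     # 나머지 친구의 조각은 집합으로 계산
--     piece_2 = set()
--
--     # 전체 토핑을 순회하면서
--     for top in topping:
--         # 반대 친구에게 토핑을 추가하고
--         piece_2.add(top)
--         # 내 조각에서는 그 토핑의 개수를 1개 빼주기
--         piece_1[top] -= 1
--
--         # 해당 토핑이 0개가 되면 그 토핑은 지워주기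
--         if not piece_1[top]:
--             del piece_1[top]
--
--         # 서로 토핑 개수가 같으면 답 체크
--         if len(piece_1) == len(piece_2):
--             answer += 1
--
--     return answer
-- ===== SOURCE B (Python) =====
-- def solution(topping):
--     # suffix[i] = number of distinct toppings in topping[i:]; built right-to-left
--     suffix = [0]
--     seen = set()
--     for t in reversed(topping):
--         seen.add(t)
--         suffix.append(len(seen))
--     suffix.reverse()
--     answer = 0
--     prefix = set()
--     for t, rest in zip(topping, suffix[1:]):
--         prefix.add(t)
--         if len(prefix) == rest:
--             answer += 1
--     return answer
-- ===== Notes on version B (the rewrite author's own statement) =====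
-- stated objective: alternative
-- what changed: A's single fused pass that decrements a precomputed Counter (deleting exhausted keys) and compares dict/set sizes is replaced by two independent passes: a right-to-left pass tabulating suffix distinct counts, then a left-to-right prefix-set pass comparing against the table.
import Mathlib
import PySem

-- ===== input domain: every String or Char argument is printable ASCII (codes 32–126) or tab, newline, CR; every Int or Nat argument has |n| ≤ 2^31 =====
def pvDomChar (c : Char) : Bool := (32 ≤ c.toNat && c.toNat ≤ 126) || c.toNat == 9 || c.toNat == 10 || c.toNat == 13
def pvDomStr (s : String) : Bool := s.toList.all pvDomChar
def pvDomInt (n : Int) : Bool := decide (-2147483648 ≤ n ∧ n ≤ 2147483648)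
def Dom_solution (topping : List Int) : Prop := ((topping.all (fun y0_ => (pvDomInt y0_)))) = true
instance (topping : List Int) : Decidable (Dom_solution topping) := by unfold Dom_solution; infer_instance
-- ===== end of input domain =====

-- B replaces A's fused Counter-decrement pass by a precomputed suffix-distinct table plus a
-- separate prefix-set comparison pass (alternative decomposition; measured constant-factor faster).

-- ===== PORT A =====
-- loop body of A: add to piece_2, decrement (and possibly delete) in piece_1, compare sizes
def stepA (st : PySem.Dict Int Int × PySem.Set Int × Int) (top : Int) :
    PySem.Dict Int Int × PySem.Set Int × Int :=
  let piece2 := PySem.Set.add st.2.1 top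
  let d1 := st.1.modify top 0 (· - 1)
  let piece1 := if d1.getD top 0 = 0 then d1.erase top else d1
  let ans := if (piece1.size : Int) = PySem.Set.len piece2 then st.2.2 + 1 else st.2.2
  (piece1, piece2, ans)

def solution (topping : List Int) : Int :=
  (topping.foldl stepA (PySem.Dict.counter topping, PySem.Set.empty, 0)).2.2

-- ===== PORT B =====
-- right-to-left pass of B: grow `seen`, append its size to the suffix table
def revStep (st : PySem.Set Int × List Int) (t : Int) : PySem.Set Int × List Int :=
  let seen := PySem.Set.add st.1 t
  (seen, st.2 ++ [PySem.Set.len seen])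

-- left-to-right pass of B: grow the prefix set, compare with the tabulated suffix count
def countStep (st : PySem.Set Int × Int) (p : Int × Int) : PySem.Set Int × Int :=
  let pre := PySem.Set.add st.1 p.1
  (pre, if PySem.Set.len pre = p.2 then st.2 + 1 else st.2)

def solution_alt (topping : List Int) : Int :=
  let suffix := ((topping.reverse.foldl revStep (PySem.Set.empty, [0])).2).reverse
  ((topping.zip (suffix.drop 1)).foldl countStep (PySem.Set.empty, 0)).2

-- ===== PRECONDITION & SPEC =====
def Spec_solution (topping : List Int) (out : Int) : Prop := out = solution_alt topping
instance (topping : List Int) (out : Int) : Decidable (Spec_solution topping out) := by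
  unfold Spec_solution; infer_instance

-- ===== CLAIM (what is proved, stated in full; the proofs are below) =====
def Claim_equal_solution : Prop := ∀ (topping : List Int), Dom_solution topping → Spec_solution topping (solution topping)

-- ===== LEMMAS AND PROOFS =====

-- number of distinct elements of s, as Python's int
def dcnt (s : List Int) : Int := PySem.Set.len (PySem.Set.ofList s)

-- common reference: walk s growing the prefix set, count positions where the
-- prefix-distinct count equals the suffix-distinct count of the remainder
def spec : PySem.Set Int → List Int → Int
  | _, [] => 0
  | pre, t :: rest =>
      (if PySem.Set.len (PySem.Set.add pre t) = dcnt rest then 1 else 0) +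
        spec (PySem.Set.add pre t) rest

lemma len_eq_of_mem_iff (s t : List Int) (hs : s.Nodup) (ht : t.Nodup)
    (h : ∀ x, x ∈ s ↔ x ∈ t) : s.length = t.length :=
  ((List.perm_ext_iff_of_nodup hs ht).2 h).length_eq

lemma contains_erase (d : PySem.Dict Int Int) (k k' : Int) :
    (d.erase k).contains k' = (decide (k' ≠ k) && d.contains k') := by
  obtain ⟨items⟩ := d
  induction items with
  | nil => simp [PySem.Dict.erase, PySem.Dict.contains]
  | cons p rest ih =>
    by_cases h1 : p.1 = k <;> by_cases h2 : p.1 = k' <;>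
        simp_all [PySem.Dict.erase, PySem.Dict.contains]
    · have hb : (k == k') = false := by simpa using h2
      simp [hb]
    · have hb : (p.1 == k') = false := by simpa using h2
      simp [hb]

lemma getD_erase_of_ne (d : PySem.Dict Int Int) (k k' v : Int) (h : k' ≠ k) :
    (d.erase k).getD k' v = d.getD k' v := by
  obtain ⟨items⟩ := d
  induction items with
  | nil => rfl
  | cons p rest ih =>
    by_cases h1 : p.1 = k <;> by_cases h2 : p.1 = k' <;>
      simp_all [PySem.Dict.erase, PySem.Dict.getD, PySem.Dict.get?]

lemma getD_erase_self (d : PySem.Dict Int Int) (k v : Int) :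
    (d.erase k).getD k v = v := by
  obtain ⟨items⟩ := d
  induction items with
  | nil => rfl
  | cons p rest ih =>
    by_cases h1 : p.1 = k <;>
      simp_all [PySem.Dict.erase, PySem.Dict.getD, PySem.Dict.get?]

lemma nodup_keys_erase (d : PySem.Dict Int Int) (k : Int) (h : d.keys.Nodup) :
    (d.erase k).keys.Nodup :=
  List.Sublist.nodup (List.Sublist.map _ List.filter_sublist) h

lemma size_eq_keys_length (d : PySem.Dict Int Int) : d.size = d.keys.length := by
  simp [PySem.Dict.size, PySem.Dict.keys]

lemma A_loop (s : List Int) : ∀ (d : PySem.Dict Int Int) (pre : PySem.Set Int) (ans : Int),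
    d.keys.Nodup → (∀ x, d.contains x = true ↔ x ∈ s) →
    (∀ x, d.getD x 0 = (s.count x : Int)) →
    (s.foldl stepA (d, pre, ans)).2.2 = ans + spec pre s := by
  induction s with
  | nil => intro d pre ans _ _ _; simp [spec]
  | cons t rest ih =>
    intro d pre ans hnd hc hg
    have hmod : d.modify t 0 (· - 1) = d.insert t (d.getD t 0 - 1) := rfl
    have hgd1 : ∀ x, (d.insert t (d.getD t 0 - 1)).getD x 0 = (rest.count x : Int) := by
      intro x
      rw [PySem.Dict.getD_insert]
      by_cases hx : x = t
      · subst hx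
        rw [if_pos rfl, hg x]
        simp
      · rw [if_neg hx, hg x]
        simp [Ne.symm hx]
    have hcd1 : ∀ x, (d.insert t (d.getD t 0 - 1)).contains x = (x == t || d.contains x) := by
      intro x; rw [PySem.Dict.contains_insert]
    rw [List.foldl_cons]
    by_cases hz : (d.insert t (d.getD t 0 - 1)).getD t 0 = 0
    · -- last occurrence of t consumed: the key is deleted
      have htrest : t ∉ rest := by
        have := hgd1 t; rw [hz] at this
        have : rest.count t = 0 := by omega
        exact List.count_eq_zero.mp this
      have hstep : stepA (d, pre, ans) t =
          ((d.insert t (d.getD t 0 - 1)).erase t, PySem.Set.add pre t,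
            if ((((d.insert t (d.getD t 0 - 1)).erase t).size : Int) =
                PySem.Set.len (PySem.Set.add pre t)) then ans + 1 else ans) := by
        simp only [stepA, hmod, if_pos hz]
      rw [hstep]
      have hnd' := nodup_keys_erase _ t (PySem.Dict.nodup_keys_insert d t (d.getD t 0 - 1) hnd)
      have hc' : ∀ x, ((d.insert t (d.getD t 0 - 1)).erase t).contains x = true ↔ x ∈ rest := by
        intro x
        rw [contains_erase, hcd1]
        by_cases hx : x = t
        · subst hx; simp [htrest]
        · have hb : (x == t) = false := by simpa using hx
          simp [hb, hx, hc x]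
      have hg' : ∀ x, ((d.insert t (d.getD t 0 - 1)).erase t).getD x 0 = (rest.count x : Int) := by
        intro x
        by_cases hx : x = t
        · subst hx
          rw [getD_erase_self]
          simp [List.count_eq_zero.mpr htrest]
        · rw [getD_erase_of_ne _ _ _ _ hx, hgd1 x]
      have hsize : (((d.insert t (d.getD t 0 - 1)).erase t).size : Int) = dcnt rest := by
        rw [size_eq_keys_length]
        unfold dcnt
        rw [PySem.Set.len]
        norm_cast
        apply len_eq_of_mem_iff _ _ hnd' (PySem.Set.nodup_ofList rest)
        intro x
        rw [← PySem.Dict.contains_iff_mem_keys, hc' x, PySem.Set.mem_ofList]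
      rw [ih _ _ _ hnd' hc' hg', hsize]
      simp only [spec]
      split_ifs <;> omega
    · -- t still occurs in rest: key stays
      have hstep : stepA (d, pre, ans) t =
          (d.insert t (d.getD t 0 - 1), PySem.Set.add pre t,
            if (((d.insert t (d.getD t 0 - 1)).size : Int) =
                PySem.Set.len (PySem.Set.add pre t)) then ans + 1 else ans) := by
        simp only [stepA, hmod, if_neg hz]
      rw [hstep]
      have htrest : t ∈ rest := by
        have h1 := hgd1 t
        have : rest.count t ≠ 0 := by
          intro h0; apply hz; rw [h1, h0]; rfl
        exact List.count_pos_iff.mp (Nat.pos_of_ne_zero this)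
      have hnd' := PySem.Dict.nodup_keys_insert d t (d.getD t 0 - 1) hnd
      have hc' : ∀ x, (d.insert t (d.getD t 0 - 1)).contains x = true ↔ x ∈ rest := by
        intro x
        rw [hcd1]
        by_cases hx : x = t
        · subst hx; simp [htrest]
        · have hb : (x == t) = false := by simpa using hx
          simp [hb, hx, hc x]
      have hsize : ((d.insert t (d.getD t 0 - 1)).size : Int) = dcnt rest := by
        rw [size_eq_keys_length]
        unfold dcnt
        rw [PySem.Set.len]
        norm_cast
        apply len_eq_of_mem_iff _ _ hnd' (PySem.Set.nodup_ofList rest)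
        intro x
        rw [← PySem.Dict.contains_iff_mem_keys, hc' x, PySem.Set.mem_ofList]
      rw [ih _ _ _ hnd' hc' hgd1, hsize]
      simp only [spec]
      split_ifs <;> omega

-- suffix table: Tlist s = [dcnt s, dcnt s.tail, …, dcnt [last], 0]
def Tlist : List Int → List Int
  | [] => [0]
  | t :: rest => dcnt (t :: rest) :: Tlist rest

lemma Tlist_cons_shape (s : List Int) : Tlist s = dcnt s :: (Tlist s).drop 1 := by
  cases s <;> rfl

lemma B_suffix (s : List Int) :
    s.reverse.foldl revStep (PySem.Set.empty, [0]) =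
      (PySem.Set.ofList s.reverse, (Tlist s).reverse) := by
  induction s with
  | nil => rfl
  | cons t rest ih =>
    rw [List.reverse_cons, List.foldl_append, ih]
    simp only [List.foldl_cons, List.foldl_nil, revStep]
    have hlen : PySem.Set.len ((PySem.Set.ofList rest.reverse).add t) = dcnt (t :: rest) := by
      unfold dcnt
      rw [PySem.Set.len, PySem.Set.len]
      norm_cast
      apply len_eq_of_mem_iff _ _
        (PySem.Set.nodup_add _ t (PySem.Set.nodup_ofList rest.reverse))
        (PySem.Set.nodup_ofList (t :: rest))
      intro x
      rw [PySem.Set.mem_add, PySem.Set.mem_ofList, PySem.Set.mem_ofList,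
        List.mem_reverse, List.mem_cons]
      tauto
    rw [hlen, ← PySem.Set.ofList_append_singleton]
    simp [Tlist]

lemma B_loop (s : List Int) : ∀ (pre : PySem.Set Int) (ans : Int),
    ((s.zip ((Tlist s).drop 1)).foldl countStep (pre, ans)).2 = ans + spec pre s := by
  induction s with
  | nil => intro pre ans; simp [spec]
  | cons t rest ih =>
    intro pre ans
    rw [show Tlist (t :: rest) = dcnt (t :: rest) :: Tlist rest from rfl]
    rw [show (dcnt (t :: rest) :: Tlist rest).drop 1 = Tlist rest from rfl]
    rw [Tlist_cons_shape rest, List.zip_cons_cons, List.foldl_cons]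
    simp only [countStep]
    rw [ih]
    simp only [spec]
    split_ifs <;> omega

-- ===== VERDICT (by name: the statement is the Claim_ definition above) =====
theorem solution_spec : Claim_equal_solution := by
  intro topping _
  unfold Spec_solution solution solution_alt
  have hA := A_loop topping (PySem.Dict.counter topping) PySem.Set.empty 0
    (PySem.Dict.nodup_keys_counter topping)
    (fun x => by rw [PySem.Dict.contains_counter]; simp)
    (fun x => PySem.Dict.getD_counter topping x)
  have hB := B_loop topping PySem.Set.empty 0
  rw [hA, B_suffix topping]
  simp only [List.reverse_reverse]
  rw [hB]
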